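-- pv_equiv track=rewrite | github.com/ziggiz-courier/ziggiz-courier-handler-core | ziggiz_courier_handler_core/decoders/utils/message/leef_1_parser.py | _safe_split_header
-- ===== SOURCE A (Python) =====
-- from typing import Dict, List, Optional, Union, cast
--
-- def _safe_split_header(text: str) -> List[str]:
--     """
--     Safely split LEEF header by pipe character, respecting escape sequences.
--
--     Args:
--         text: Text to split
--
--     Returns:
--         List of split values
--     """
--     result = []
--     current = ""
--     i = 0
--     pipe_count = 0
--
--     while i < len(text):
--         # Handle escaped pipes
--         if text[i] == "\\" and i + 1 < len(text) and text[i + 1] == "|":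
--             current += "|"  # Keep the pipe character
--             i += 2
--         elif text[i] == "|":
--             # Normal pipe - field delimiter
--             result.append(current)
--             current = ""
--             pipe_count += 1
--
--             # Stop after the 5th pipe (we expect 5 pipes for LEEF header)
--             if pipe_count == 5:
--                 result.append(text[i + 1 :])  # Rest is extension
--                 break
--
--             i += 1
--         else:
--             current += text[i]
--             i += 1
--
--     # Add final part if we haven't reached 5 pipes
--     if pipe_count < 5:
--         result.append(current)
--
--     return result
-- ===== SOURCE B (Python) =====
-- def _safe_split_header(text: str) -> list:
--     # Split on every pipe, then merge back fields whose pipe was escaped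
--     # (a chunk ending in a backslash escaped the following pipe), stopping
--     # after the 5th real field so the extension stays raw.
--     raw = text.split("|")
--     out = []
--     buf = raw[0]
--     i = 1
--     while i < len(raw):
--         if buf.endswith("\\"):
--             buf = buf[:-1] + "|" + raw[i]
--             i += 1
--         elif len(out) == 4:
--             out.append(buf)
--             out.append("|".join(raw[i:]))
--             return out
--         else:
--             out.append(buf)
--             buf = raw[i]
--             i += 1
--     out.append(buf)
--     return out
-- ===== Notes on version B (the rewrite author's own statement) =====
-- stated objective: faster
-- what changed: Replaces A's char-by-char scanner (index arithmetic, escape lookahead, per-character string concatenation) with a single split on the pipe character followed by a merge pass that rejoins chunks whose trailing backslash escaped their pipe, stopping after the 5th field so the extension stays raw.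
import Mathlib
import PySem

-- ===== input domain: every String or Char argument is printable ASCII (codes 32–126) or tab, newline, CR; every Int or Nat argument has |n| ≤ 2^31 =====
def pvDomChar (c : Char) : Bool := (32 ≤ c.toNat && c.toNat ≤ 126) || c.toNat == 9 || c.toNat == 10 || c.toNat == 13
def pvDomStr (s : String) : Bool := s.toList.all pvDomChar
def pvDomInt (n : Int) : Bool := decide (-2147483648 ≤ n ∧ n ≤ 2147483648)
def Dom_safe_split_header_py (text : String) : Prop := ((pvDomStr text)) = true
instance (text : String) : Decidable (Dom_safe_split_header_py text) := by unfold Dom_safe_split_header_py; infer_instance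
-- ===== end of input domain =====

-- B replaces A's char-by-char scanner with split-on-pipe + a merge pass rejoining escape-terminated chunks; measured faster in a timing run.

-- ===== PORT A =====
-- A's while loop: index i becomes recursion on the remaining character list;
-- `text[i] == "\\" and i+1 < len(text) and text[i+1] == "|"` is `c = '\\' ∧ rest.head? = some '|'`,
-- `i += 2` is `rest.tail`, `text[i+1:]` is `rest`.
def goA (l : List Char) (current : List Char) (result : List String) (count : Nat) : List String :=
  match l with
  | [] => if count < 5 then result ++ [String.mk current] else result
  | c :: rest =>
    if c = '\\' ∧ rest.head? = some '|' then
      goA rest.tail (current ++ ['|']) result count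
    else if c = '|' then
      (if count + 1 = 5 then result ++ [String.mk current, String.mk rest]
       else goA rest [] (result ++ [String.mk current]) (count + 1))
    else goA rest (current ++ [c]) result count
termination_by l.length
decreasing_by
  all_goals simp [List.length_tail]

def safe_split_header_py (text : String) : List String := goA text.toList [] [] 0

-- ===== PORT B =====
-- port of text.split("|") (single-character separator, no maxsplit; exact: ''.split('|') = [''])
def splitPipe : List Char → List (List Char)
  | [] => [[]]
  | c :: rest =>
    if c = '|' then [] :: splitPipe rest
    else (c :: (splitPipe rest).headI) :: (splitPipe rest).tail

-- port of "|".join(parts)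
def joinPipe : List (List Char) → List Char
  | [] => []
  | [r] => r
  | r :: rs => r ++ '|' :: joinPipe rs

-- B's while loop over the remaining raw chunks, with `buf` and `out` as in Source B
def goB (rs : List (List Char)) (buf : List Char) (out : List (List Char)) : List (List Char) :=
  match rs with
  | [] => out ++ [buf]
  | r :: rs' =>
    if buf.getLast? = some '\\' then goB rs' (buf.dropLast ++ '|' :: r) out
    else if out.length = 4 then out ++ [buf, joinPipe (r :: rs')]
    else goB rs' r (out ++ [buf])

def safe_split_header_py_alt (text : String) : List String :=
  match splitPipe text.toList with
  | [] => []   -- unreachable: split never returns an empty list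
  | b :: rs => (goB rs b []).map String.mk

-- ===== PRECONDITION & SPEC =====
def Spec_safe_split_header_py (text : String) (out : List String) : Prop := out = safe_split_header_py_alt text
instance (text : String) (out : List String) : Decidable (Spec_safe_split_header_py text out) := by unfold Spec_safe_split_header_py; infer_instance

-- ===== CLAIM (what is proved, stated in full; the proofs are below) =====
def Claim_equal_safe_split_header_py : Prop := ∀ (text : String), Dom_safe_split_header_py text → Spec_safe_split_header_py text (safe_split_header_py text)

-- ===== LEMMAS AND PROOFS =====

-- equation lemmas for the well-founded definition goA
theorem goA_nil (cur : List Char) (res : List String) (cnt : Nat) :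
    goA [] cur res cnt = if cnt < 5 then res ++ [String.mk cur] else res := by
  rw [goA.eq_def]

theorem goA_cons (c : Char) (rest cur : List Char) (res : List String) (cnt : Nat) :
    goA (c :: rest) cur res cnt =
      if c = '\\' ∧ rest.head? = some '|' then goA rest.tail (cur ++ ['|']) res cnt
      else if c = '|' then
        (if cnt + 1 = 5 then res ++ [String.mk cur, String.mk rest]
         else goA rest [] (res ++ [String.mk cur]) (cnt + 1))
      else goA rest (cur ++ [c]) res cnt := by
  rw [goA.eq_def]

-- the text that follows the chunk list rs (nothing, or a separating pipe then the joined chunks)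
def tailJoin (rs : List (List Char)) : List Char := if rs = [] then [] else '|' :: joinPipe rs

-- A's current field / remaining text at the iteration boundary corresponding to B-state (buf, rs)
def aCur (buf : List Char) (rs : List (List Char)) : List Char :=
  if buf.getLast? = some '\\' ∧ rs ≠ [] then buf.dropLast else buf
def aRem (buf : List Char) (rs : List (List Char)) : List Char :=
  if buf.getLast? = some '\\' ∧ rs ≠ [] then '\\' :: '|' :: joinPipe rs else tailJoin rs

theorem joinPipe_cons (r : List Char) (rs : List (List Char)) :
    joinPipe (r :: rs) = r ++ tailJoin rs := by
  cases rs <;> simp [joinPipe, tailJoin]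

theorem splitPipe_ne_nil (cs : List Char) : splitPipe cs ≠ [] := by
  cases cs with
  | nil => simp [splitPipe]
  | cons c rest => by_cases h : c = '|' <;> simp [splitPipe, h]

theorem noPipe_splitPipe (cs : List Char) : ∀ r ∈ splitPipe cs, '|' ∉ r := by
  induction cs with
  | nil => intro r hr; simp [splitPipe] at hr; simp [hr]
  | cons c rest ih =>
    intro r hr
    by_cases h : c = '|' <;> simp [splitPipe, h] at hr
    · rcases hr with h1 | h1
      · simp [h1]
      · exact ih r h1
    · rcases hr with h1 | h1
      · subst h1
        obtain ⟨p, ps, hps⟩ := List.exists_cons_of_ne_nil (splitPipe_ne_nil rest)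
        have hp : '|' ∉ p := ih p (by rw [hps]; simp)
        rw [hps]
        simp only [List.headI, List.mem_cons, not_or]
        exact ⟨fun hx => h hx.symm, fun hx => hp hx⟩
      · exact ih r (List.mem_of_mem_tail h1)

theorem joinPipe_splitPipe (cs : List Char) : joinPipe (splitPipe cs) = cs := by
  induction cs with
  | nil => simp [splitPipe, joinPipe]
  | cons c rest ih =>
    by_cases h : c = '|'
    · have hne := splitPipe_ne_nil rest
      subst h
      rw [show splitPipe ('|' :: rest) = [] :: splitPipe rest from by simp [splitPipe]]
      rw [joinPipe_cons]
      simp [tailJoin, hne, ih]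
    · obtain ⟨p, ps, hps⟩ := List.exists_cons_of_ne_nil (splitPipe_ne_nil rest)
      simp only [splitPipe, if_neg h, hps, List.headI, List.tail]
      rw [joinPipe_cons]
      have : joinPipe (p :: ps) = rest := by rw [hps] at ih; exact ih
      rw [joinPipe_cons] at this
      simp [← this]

-- A consumes a pipe-free block of text in plain single-char steps
theorem goA_consume (d : List Char) (rest : List Char) (cur : List Char)
    (res : List String) (cnt : Nat) (hnp : '|' ∉ d)
    (hb : d.getLast? = some '\\' → rest.head? ≠ some '|') :
    goA (d ++ rest) cur res cnt = goA rest (cur ++ d) res cnt := by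
  induction d generalizing cur with
  | nil => simp
  | cons c d₂ ih =>
    have hcp : c ≠ '|' := by simp at hnp; tauto
    have hnd₂ : '|' ∉ d₂ := by simp at hnp; tauto
    have hesc : ¬ (c = '\\' ∧ (d₂ ++ rest).head? = some '|') := by
      rintro ⟨hc, hh⟩
      cases d₂ with
      | nil =>
        have : ([c] : List Char).getLast? = some '\\' := by simp [hc]
        exact hb this (by simpa using hh)
      | cons x xs => simp at hh; simp [hh] at hnd₂
    rw [List.cons_append, goA_cons, if_neg hesc, if_neg hcp, ih (cur ++ [c]) hnd₂]
    · simp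
    · intro hlast
      cases d₂ with
      | nil => simp at hlast
      | cons x xs =>
        apply hb
        simpa [List.getLast?_cons_cons] using hlast

-- consuming one raw chunk lands A exactly at the boundary state (aCur, aRem)
theorem goA_chunk (r : List Char) (rs : List (List Char)) (cur : List Char)
    (res : List String) (cnt : Nat) (hnp : '|' ∉ r) :
    goA (r ++ tailJoin rs) cur res cnt = goA (aRem r rs) (cur ++ aCur r rs) res cnt := by
  by_cases hc : r.getLast? = some '\\' ∧ rs ≠ []
  · obtain ⟨hlast, hrs⟩ := hc
    obtain ⟨l', hl⟩ := List.getLast?_eq_some_iff.mp hlast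
    have hdrop : r.dropLast = l' := by rw [hl]; simp
    have hnp' : '|' ∉ l' := fun h => hnp (by rw [hl]; exact List.mem_append_left _ h)
    rw [aCur, aRem, if_pos ⟨hlast, hrs⟩, if_pos ⟨hlast, hrs⟩]
    have htext : r ++ tailJoin rs = l' ++ ('\\' :: '|' :: joinPipe rs) := by
      rw [tailJoin, if_neg hrs, hl]; simp
    rw [htext, goA_consume l' _ cur res cnt hnp' (by simp), hdrop]
  · rw [aCur, aRem, if_neg hc, if_neg hc]
    apply goA_consume r _ cur res cnt hnp
    intro hlast
    have hrs : rs = [] := by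
      by_contra h; exact hc ⟨hlast, h⟩
    simp [tailJoin, hrs]

-- the last element of a merged buffer is the last element of the appended chunk
theorem getLast?_append' {α : Type} (l₁ l₂ : List α) (h : l₂ ≠ []) :
    (l₁ ++ l₂).getLast? = l₂.getLast? := by
  cases hb : l₂.getLast? with
  | none => exact absurd (List.getLast?_eq_none_iff.mp hb) h
  | some a => rw [List.getLast?_append, hb]; rfl

theorem getLast?_merge (buf r : List Char) (hr : r ≠ []) :
    (buf.dropLast ++ '|' :: r).getLast? = r.getLast? := by
  rw [getLast?_append' _ _ (by simp)]
  cases r with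
  | nil => exact absurd rfl hr
  | cons x xs => rw [List.getLast?_cons_cons]

theorem merge_lastBS (buf r : List Char) (rs' : List (List Char)) :
    ((buf.dropLast ++ '|' :: r).getLast? = some '\\' ∧ rs' ≠ []) ↔ (r.getLast? = some '\\' ∧ rs' ≠ []) := by
  constructor
  · rintro ⟨h1, h2⟩
    refine ⟨?_, h2⟩
    cases r with
    | nil => rw [getLast?_append' _ _ (by simp)] at h1; simp at h1
    | cons x xs => rw [getLast?_merge buf _ (by simp)] at h1; exact h1
  · rintro ⟨h1, h2⟩
    have hr : r ≠ [] := by intro h; rw [h] at h1; simp at h1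
    exact ⟨by rw [getLast?_merge buf r hr]; exact h1, h2⟩

-- main invariant: from any boundary state, A's scanner and B's chunk merger agree
theorem main_inv (rs : List (List Char)) (buf : List Char) (out : List (List Char))
    (hnp : ∀ r ∈ rs, '|' ∉ r) (hlen : out.length < 5) :
    goA (aRem buf rs) (aCur buf rs) (out.map String.mk) out.length
      = (goB rs buf out).map String.mk := by
  induction rs generalizing buf out with
  | nil =>
    simp [aRem, aCur, tailJoin, goA_nil, goB, hlen]
  | cons r rs' ih =>
    have hnr : '|' ∉ r := hnp r (by simp)
    have hnrs' : ∀ x ∈ rs', '|' ∉ x := fun x hx => hnp x (by simp [hx])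
    by_cases hb : buf.getLast? = some '\\'
    · -- merge step: A is before the escape '\|', B merges buf with r
      rw [aRem, aCur, if_pos ⟨hb, by simp⟩, if_pos ⟨hb, by simp⟩]
      rw [goA_cons, if_pos (by simp)]
      simp only [List.tail_cons]
      rw [joinPipe_cons, goA_chunk r rs' _ _ _ hnr]
      rw [goB, if_pos hb]
      rw [← ih (buf.dropLast ++ '|' :: r) out hnrs' hlen]
      congr 1
      · -- aRem agrees
        rw [aRem, aRem]
        by_cases hr : r.getLast? = some '\\' ∧ rs' ≠ []
        · rw [if_pos hr, if_pos ⟨(getLast?_merge buf r (by intro h; rw [h] at hr; simp at hr)).trans hr.1, hr.2⟩]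
        · rw [if_neg hr, if_neg (fun h => hr ((merge_lastBS buf r rs').mp h))]
      · -- aCur agrees
        rw [aCur, aCur]
        by_cases hr : r.getLast? = some '\\' ∧ rs' ≠ []
        · have hrne : r ≠ [] := by intro h; rw [h] at hr; simp at hr
          rw [if_pos hr, if_pos ⟨(getLast?_merge buf r hrne).trans hr.1, hr.2⟩]
          rw [List.dropLast_append_cons]
          cases r with
          | nil => exact absurd rfl hrne
          | cons x xs => simp
        · rw [if_neg hr, if_neg (fun h => hr ((merge_lastBS buf r rs').mp h))]
          simp
    · -- split step: A sees an unescaped pipe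
      rw [aRem, aCur, if_neg (by tauto), if_neg (by tauto)]
      rw [tailJoin, if_neg (by simp)]
      rw [goA_cons, if_neg (by rintro ⟨h, _⟩; exact absurd h (by decide)), if_pos rfl]
      by_cases h4 : out.length = 4
      · rw [if_pos (by omega)]
        rw [goB, if_neg hb, if_pos h4]
        simp
      · rw [if_neg (by omega)]
        rw [joinPipe_cons, goA_chunk r rs' _ _ _ hnr]
        rw [goB, if_neg hb, if_neg h4]
        have := ih r (out ++ [buf]) hnrs' (by simp; omega)
        simpa using this

-- ===== VERDICT (by name: the statement is the Claim_ definition above) =====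
theorem safe_split_header_py_spec : Claim_equal_safe_split_header_py := by
  intro text _
  unfold Spec_safe_split_header_py safe_split_header_py safe_split_header_py_alt
  obtain ⟨b, rs, hsplit⟩ := List.exists_cons_of_ne_nil (splitPipe_ne_nil text.toList)
  rw [hsplit]
  have hjoin : text.toList = b ++ tailJoin rs := by
    rw [← joinPipe_splitPipe text.toList, hsplit, joinPipe_cons]
  have hnb : '|' ∉ b := noPipe_splitPipe text.toList b (by rw [hsplit]; simp)
  have hnrs : ∀ r ∈ rs, '|' ∉ r := fun r hr =>
    noPipe_splitPipe text.toList r (by rw [hsplit]; simp [hr])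
  rw [hjoin, goA_chunk b rs [] [] 0 hnb]
  have := main_inv rs b [] hnrs (by simp)
  simpa using this
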